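-- pv_equiv track=rewrite | github.com/karzmei/Book-index | nlp_operations.py | words_count_in_txt
-- ===== SOURCE A (Python) =====
-- def words_count_in_txt(text_words_list, wanted_words_set):
-- 	'''
-- 	Counts how many times each word from the wanted_words_set appears in the text_words_list,
-- 	Returning a dictionary with elements (word, #times it appears)
-- 	(text is string, words_list is a list of strings)
-- 	NOTE: everything is in lower-case for now.
-- 	Returning also the total number of
-- 	'''
-- 	text_words_list = [token.lower() for token in text_words_list]
-- 	if wanted_words_set == {}:
-- 		wanted_words_set = set(text_words_list)
-- 	wanted_words_set = {token.lower() for token in wanted_words_set} #all to lowercase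
--
-- 	words_stat = {token: 0 for token in wanted_words_set}
-- 	for token in text_words_list:
-- 		if token in wanted_words_set:  # only interested in counting those
-- 			words_stat[token] += 1
-- 		# words_stat was predefined with all words from wanted_words_set, so no need to check it the word exists there and manually add if not
-- 	return words_stat
-- ===== SOURCE B (Python) =====
-- def words_count_in_txt(text_words_list, wanted_words_set):
-- 	'''Per-word scan: lowercase the text once, then for each distinct lowercased
-- 	wanted word count its occurrences with list.count — no counting dict at all.'''
-- 	lowered = [tok.lower() for tok in text_words_list]
-- 	return {w: lowered.count(w) for w in {x.lower() for x in wanted_words_set}}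
-- ===== Notes on version B (the rewrite author's own statement) =====
-- stated objective: simpler
-- what changed: Drops A's incrementally-updated counting dict entirely: B lowercases the text once and then, for each distinct lowercased wanted word, counts its occurrences with a separate list.count scan (per-word scans instead of one guarded incrementing pass).
import Mathlib
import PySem

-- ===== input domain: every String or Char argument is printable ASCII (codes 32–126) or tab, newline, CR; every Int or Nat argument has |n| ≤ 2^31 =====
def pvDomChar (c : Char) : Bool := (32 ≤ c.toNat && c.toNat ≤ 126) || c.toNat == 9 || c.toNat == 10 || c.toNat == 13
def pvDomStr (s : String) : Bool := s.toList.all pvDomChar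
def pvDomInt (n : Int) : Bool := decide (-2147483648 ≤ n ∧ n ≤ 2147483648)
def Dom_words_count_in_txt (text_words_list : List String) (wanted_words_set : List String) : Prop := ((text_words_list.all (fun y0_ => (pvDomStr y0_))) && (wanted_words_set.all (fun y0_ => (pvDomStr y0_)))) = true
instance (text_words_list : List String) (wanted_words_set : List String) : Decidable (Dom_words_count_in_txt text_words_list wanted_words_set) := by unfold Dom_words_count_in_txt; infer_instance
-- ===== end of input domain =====

-- B drops the counting dict: it lowercases the text once and counts each distinct
-- lowercased wanted word with a separate list.count scan (simpler, per-word scans).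
-- Return-value equivalence only; outputs (Python dicts) are compared as key/value maps.

-- ===== PORT A =====
-- A's 'if wanted_words_set == {}' compares a set with an empty dict and is never true
-- for a set (or list) argument, so that dead branch has no counterpart here.
def words_count_in_txt (text_words_list : List String) (wanted_words_set : List String) : List (String × Int) :=
  let tl := text_words_list.map PySem.Str.lower
  let ws : PySem.Set String := PySem.Set.ofList (wanted_words_set.map PySem.Str.lower)
  let init : PySem.Dict String Int := ws.foldl (fun d k => d.insert k 0) PySem.Dict.empty
  let stat := tl.foldl (fun d tok => if ws.contains tok then d.modify tok 0 (· + 1) else d) init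
  stat.items

-- ===== PORT B =====
def words_count_in_txt_alt (text_words_list : List String) (wanted_words_set : List String) : List (String × Int) :=
  let lowered := text_words_list.map PySem.Str.lower
  (PySem.Set.ofList (wanted_words_set.map PySem.Str.lower)).map
    (fun w => (w, (PySem.List.count lowered w : Int)))

-- ===== PRECONDITION & SPEC =====
def Spec_words_count_in_txt (text_words_list : List String) (wanted_words_set : List String) (out : List (String × Int)) : Prop := out = words_count_in_txt_alt text_words_list wanted_words_set
instance (text_words_list : List String) (wanted_words_set : List String) (out : List (String × Int)) : Decidable (Spec_words_count_in_txt text_words_list wanted_words_set out) := by unfold Spec_words_count_in_txt; infer_instance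

-- ===== CLAIM (what is proved, stated in full; the proofs are below) =====
def Claim_equal_words_count_in_txt : Prop := ∀ (text_words_list : List String) (wanted_words_set : List String), Dom_words_count_in_txt text_words_list wanted_words_set → Spec_words_count_in_txt text_words_list wanted_words_set (words_count_in_txt text_words_list wanted_words_set)

-- ===== LEMMAS AND PROOFS =====

-- A's counting loop: getD of the result, for any dict d and key k.
lemma loop_getD (ws : PySem.Set String) (tl : List String) (d : PySem.Dict String Int) (k : String) :
    (tl.foldl (fun d tok => if ws.contains tok then d.modify tok 0 (· + 1) else d) d).getD k 0
      = d.getD k 0 + (if ws.contains k then (tl.count k : Int) else 0) := by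
  induction tl generalizing d with
  | nil => simp
  | cons tok tl ih =>
    simp only [List.foldl_cons]
    by_cases hm : ws.contains tok = true
    · rw [if_pos hm, ih]
      by_cases hk : k = tok
      · subst hk
        simp only [PySem.Dict.getD_modify_self, hm, if_true, List.count_cons_self]
        push_cast; ring
      · rw [PySem.Dict.getD_modify_of_ne d 0 (· + 1) hk,
            List.count_cons_of_ne (Ne.symm hk)]
    · rw [if_neg hm, ih]
      by_cases hk : k = tok
      · subst hk; rw [if_neg hm, if_neg hm]
      · rw [List.count_cons_of_ne (Ne.symm hk)]

-- A's counting loop never changes the key list when every guarded token is already a key.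
lemma loop_keys (ws : PySem.Set String) (tl : List String) (d : PySem.Dict String Int)
    (h : ∀ tok, ws.contains tok = true → d.contains tok = true) :
    (tl.foldl (fun d tok => if ws.contains tok then d.modify tok 0 (· + 1) else d) d).keys = d.keys := by
  induction tl generalizing d with
  | nil => rfl
  | cons tok tl ih =>
    simp only [List.foldl_cons]
    by_cases hm : ws.contains tok = true
    · rw [if_pos hm, ih]
      · rw [PySem.Dict.keys_modify, PySem.Dict.keys_insert_of_contains d _ (h tok hm)]
      · intro t ht
        rw [PySem.Dict.contains_modify]
        cases h' : t == tok <;> simp [h t ht]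
    · rw [if_neg hm, ih _ h]

-- A's initialisation loop over the (Nodup) wanted set: items are the keys paired with 0.
lemma init_items (ws : PySem.Set String) (hnd : ws.Nodup) :
    (ws.foldl (fun d k => d.insert k 0) (PySem.Dict.empty : PySem.Dict String Int)).items
      = ws.map (fun k => (k, (0 : Int))) := by
  have := PySem.Dict.items_foldl_insert_fresh (l := ws) (k := fun x => x) (v := fun _ => (0 : Int))
    (d := (PySem.Dict.empty : PySem.Dict String Int))
    (by intro a _; simp) (by simpa using hnd)
  simpa using this

-- ===== VERDICT (by name: the statement is the Claim_ definition above) =====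
theorem words_count_in_txt_spec : Claim_equal_words_count_in_txt := by
  intro t w _
  unfold Spec_words_count_in_txt words_count_in_txt words_count_in_txt_alt
  simp only []
  set tl := t.map PySem.Str.lower with htl
  set ws : PySem.Set String := PySem.Set.ofList (w.map PySem.Str.lower) with hws
  have hnd : ws.Nodup := PySem.Set.nodup_ofList _
  set init : PySem.Dict String Int := ws.foldl (fun d k => d.insert k 0) PySem.Dict.empty with hinit
  have hitems : init.items = ws.map (fun k => (k, (0 : Int))) := init_items ws hnd
  have hkeys : init.keys = ws := by
    show init.items.map (·.1) = ws
    rw [hitems]; simp [Function.comp_def]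
  have hcont : ∀ tok, ws.contains tok = true → init.contains tok = true := by
    intro tok htok
    rw [PySem.Dict.contains_eq_decide_mem_keys, hkeys]
    simpa [PySem.Set.contains] using htok
  set stat := tl.foldl (fun d tok => if ws.contains tok then d.modify tok 0 (· + 1) else d) init
    with hstat
  have hskeys : stat.keys = ws := by rw [hstat, loop_keys ws tl init hcont, hkeys]
  have hsnd : stat.keys.Nodup := by rw [hskeys]; exact hnd
  rw [PySem.Dict.items_eq_map_keys stat hsnd 0, hskeys]
  refine List.map_congr_left ?_
  intro k hk
  have hkws : ws.contains k = true := by simpa [PySem.Set.contains] using hk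
  have hinit0 : init.getD k 0 = 0 := by
    refine PySem.Dict.getD_of_mem_items init ?_ (by rw [hkeys]; exact hnd) 0
    rw [hitems]; exact List.mem_map.2 ⟨k, hk, rfl⟩
  have hleft : stat.getD k 0 = (tl.count k : Int) := by
    rw [hstat, loop_getD ws tl init k, hinit0, if_pos hkws]; ring
  rw [hleft, PySem.List.count_eq]
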